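-- pv_equiv track=rewrite | github.com/DigitalMediaProfessionals/tool | cnn_convertor/fpga_layer.py | _get_weight_size_dil
-- ===== SOURCE A (Python) =====
-- def _get_weight_size(inc, outc, kernel, quantization, use_prelu):
--     """
--     get weight size of non-dilation convolution
--     @param inc # of input channels
--     @param outc # of output channels
--     @param kernel Krenel size: max(kx, ky) | 1
--     @param quantization Flag if quantization is enabled or not
--     @param use_prelu Flag if PReLU follows after this CONV
--     """
--     if kernel == 7:
--         pass
--     if kernel == 5:
--         inc = inc // 2 + inc % 2
--     if kernel == 3:
--         inc = inc // 8 + (0 if inc % 8 == 0 else 1)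
--     if kernel == 1:
--         inc = inc // 64 + (0 if inc % 64 == 0 else 1)
--
--     if quantization:
--         wsize = 512 + 72 * outc * inc + 16 * ((outc + 7) // 8)
--         wsize = (wsize + 0xf) & (~0xf)  # align to 16 bytes
--     else:
--         wsize = 144 * outc * inc + 16 * ((outc + 7) // 8)
--
--     # add PReLU parameter size
--     if use_prelu:
--         wsize += 16 * ((outc + 7) // 8)
--     return wsize
--
-- def _get_weight_size_dil(inc, outc, kx, ky, quantization, use_prelu=False):
--     """
--     get weight size of dilation convolution
--     @param inc # of input channels
--     @param outc # of output channels
--     @param kx Kernel size in x axis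
--     @param ky Kernel size in y axis
--     @param quantization Flag if quantization is enabled or not
--     @param use_prelu Flag if PReLU follows after this CONV
--     """
--     wsize = 512 if quantization else 0
--     _w = _get_weight_size(inc, outc, 1, quantization, use_prelu)
--     for _ in range(kx * ky):
--         wsize += _w
--         if quantization:
--             wsize -= 512
--         d = wsize & 15
--         if d:
--             wsize += 16 - d
--
--     return wsize
-- ===== SOURCE B (Python) =====
-- def _get_weight_size_dil(inc, outc, kx, ky, quantization, use_prelu=False):
--     # Closed form: every per-iteration increment of A's loop is already a
--     # multiple of 16, so the 16-byte re-alignment inside the loop is a no-op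
--     # and the result is base + max(kx*ky, 0) * step.
--     c = -(-inc // 64)                      # ceil(inc / 64)
--     blk = 16 * ((outc + 7) // 8)
--     if quantization:
--         per = 512 + 72 * outc * c + blk
--         per += (-per) % 16                 # align up to a multiple of 16
--         step = per - 512
--     else:
--         step = 144 * outc * c + blk
--     if use_prelu:
--         step += blk
--     n = kx * ky
--     base = 512 if quantization else 0
--     return base + (n if n > 0 else 0) * step
-- ===== Notes on version B (the rewrite author's own statement) =====
-- stated objective: faster
-- what changed: Replaced the loop of kx*ky add-and-align steps by a closed form base + max(kx*ky,0)*step: every per-iteration increment is a multiple of 16, so the in-loop 16-byte alignment is a no-op and the sum is linear.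
import Mathlib
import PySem

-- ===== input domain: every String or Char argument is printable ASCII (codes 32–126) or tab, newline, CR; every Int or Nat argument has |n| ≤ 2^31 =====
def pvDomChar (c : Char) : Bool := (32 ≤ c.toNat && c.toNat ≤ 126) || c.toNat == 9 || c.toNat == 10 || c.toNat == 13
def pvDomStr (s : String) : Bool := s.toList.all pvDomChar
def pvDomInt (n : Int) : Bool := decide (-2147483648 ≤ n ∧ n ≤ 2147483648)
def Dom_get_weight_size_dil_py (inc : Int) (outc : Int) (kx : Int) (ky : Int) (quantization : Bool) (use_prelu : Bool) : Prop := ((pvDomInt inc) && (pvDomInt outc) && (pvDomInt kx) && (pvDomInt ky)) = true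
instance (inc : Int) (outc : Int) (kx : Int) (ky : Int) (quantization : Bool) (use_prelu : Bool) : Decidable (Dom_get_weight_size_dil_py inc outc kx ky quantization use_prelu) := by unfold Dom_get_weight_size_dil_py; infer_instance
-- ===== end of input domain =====

-- B replaces A's O(kx*ky) add-and-align loop by a closed form (all increments are 16-aligned).

-- ===== PORT A =====
-- port of _get_weight_size (kernel branches, quantization alignment, prelu)
-- 'wsize & ~0xf' and 'wsize & 15' are ported exactly with PySem.Int.band (Python-exact on negatives)
def pvA_get_weight_size (inc : Int) (outc : Int) (kernel : Int) (quantization : Bool) (use_prelu : Bool) : Int :=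
  let inc := if kernel = 5 then PySem.Int.floordiv inc 2 + PySem.Int.mod inc 2 else inc
  let inc := if kernel = 3 then PySem.Int.floordiv inc 8 + (if PySem.Int.mod inc 8 = 0 then 0 else 1) else inc
  let inc := if kernel = 1 then PySem.Int.floordiv inc 64 + (if PySem.Int.mod inc 64 = 0 then 0 else 1) else inc
  let wsize :=
    if quantization then
      let w := 512 + 72 * outc * inc + 16 * (PySem.Int.floordiv (outc + 7) 8)
      PySem.Int.band (w + 15) (Int.not 15)
    else
      144 * outc * inc + 16 * (PySem.Int.floordiv (outc + 7) 8)
  if use_prelu then wsize + 16 * (PySem.Int.floordiv (outc + 7) 8) else wsize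

-- the 'for _ in range(kx*ky)' loop, as structural recursion on the iteration count
def pvA_dilLoop (quantization : Bool) (w : Int) : Nat → Int → Int
  | 0, wsize => wsize
  | n + 1, wsize =>
    let wsize := wsize + w
    let wsize := if quantization then wsize - 512 else wsize
    let d := PySem.Int.band wsize 15
    let wsize := if d ≠ 0 then wsize + (16 - d) else wsize
    pvA_dilLoop quantization w n wsize

def get_weight_size_dil_py (inc : Int) (outc : Int) (kx : Int) (ky : Int) (quantization : Bool) (use_prelu : Bool) : Int :=
  let wsize : Int := if quantization then 512 else 0
  let w := pvA_get_weight_size inc outc 1 quantization use_prelu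
  pvA_dilLoop quantization w (kx * ky).toNat wsize

-- ===== PORT B =====
def get_weight_size_dil_py_alt (inc : Int) (outc : Int) (kx : Int) (ky : Int) (quantization : Bool) (use_prelu : Bool) : Int :=
  let c := -(PySem.Int.floordiv (-inc) 64)
  let blk := 16 * (PySem.Int.floordiv (outc + 7) 8)
  let step :=
    if quantization then
      let per := 512 + 72 * outc * c + blk
      let per := per + PySem.Int.mod (-per) 16
      per - 512
    else
      144 * outc * c + blk
  let step := if use_prelu then step + blk else step
  let n := kx * ky
  let base : Int := if quantization then 512 else 0
  base + (if n > 0 then n else 0) * step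

-- ===== PRECONDITION & SPEC =====
def Spec_get_weight_size_dil_py (inc : Int) (outc : Int) (kx : Int) (ky : Int) (quantization : Bool) (use_prelu : Bool) (out : Int) : Prop := out = get_weight_size_dil_py_alt inc outc kx ky quantization use_prelu
instance (inc : Int) (outc : Int) (kx : Int) (ky : Int) (quantization : Bool) (use_prelu : Bool) (out : Int) : Decidable (Spec_get_weight_size_dil_py inc outc kx ky quantization use_prelu out) := by unfold Spec_get_weight_size_dil_py; infer_instance

-- ===== CLAIM (what is proved, stated in full; the proofs are below) =====
def Claim_equal_get_weight_size_dil_py : Prop := ∀ (inc : Int) (outc : Int) (kx : Int) (ky : Int) (quantization : Bool) (use_prelu : Bool), Dom_get_weight_size_dil_py inc outc kx ky quantization use_prelu → Spec_get_weight_size_dil_py inc outc kx ky quantization use_prelu (get_weight_size_dil_py inc outc kx ky quantization use_prelu)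

-- ===== LEMMAS AND PROOFS =====

theorem pv_nat_and15 (m : Nat) : m &&& 15 = m % 16 := by
  simpa using Nat.and_two_pow_sub_one_eq_mod m 4

theorem pv_nat_or15_small (x : Nat) (hx : x < 16) : x ||| 15 = 15 := by
  interval_cases x <;> decide

theorem pv_nat_or15 (m : Nat) : m ||| 15 = 16 * (m / 16) + 15 := by
  have h2 : m = (m / 16) <<< 4 ||| m % 16 := by
    rw [← Nat.shiftLeft_add_eq_or_of_lt (i := 4) (b := m % 16) (by omega) (m / 16)]
    simp [Nat.shiftLeft_eq]; omega
  calc m ||| 15 = ((m / 16) <<< 4 ||| m % 16) ||| 15 := by rw [← h2]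
    _ = (m / 16) <<< 4 ||| (m % 16 ||| 15) := by rw [Nat.or_assoc]
    _ = (m / 16) <<< 4 ||| 15 := by rw [pv_nat_or15_small _ (by omega)]
    _ = (m / 16) <<< 4 + 15 := by
          rw [← Nat.shiftLeft_add_eq_or_of_lt (i := 4) (b := 15) (by norm_num) (m / 16)]
    _ = 16 * (m / 16) + 15 := by simp [Nat.shiftLeft_eq]; ring

theorem pv_band15 (a : Int) : PySem.Int.band a 15 = a % 16 := by
  unfold PySem.Int.band
  have hmask : (15 : Int).toNat = 15 := by decide
  by_cases h : 0 ≤ a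
  · simp only [h, if_true, (by norm_num : (0:Int) ≤ 15), if_true, hmask]
    have := pv_nat_and15 a.toNat
    omega
  · simp only [h, if_false, (by norm_num : (0:Int) ≤ 15), if_true, hmask]
    rw [Nat.and_comm, pv_nat_and15]
    omega

theorem pv_band_neg16 (a : Int) : PySem.Int.band a (-16) = a - a % 16 := by
  unfold PySem.Int.band
  have hm : (-(-16:Int) - 1).toNat = 15 := by decide
  by_cases h : 0 ≤ a
  · simp only [h, if_true, (by norm_num : ¬ (0:Int) ≤ -16), if_false, hm]
    rw [pv_nat_and15]
    omega
  · simp only [h, if_false, (by norm_num : ¬ (0:Int) ≤ -16), if_false, hm]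
    have := pv_nat_or15 (-a - 1).toNat
    omega

-- A's ceiling division 'inc//64 + (0 if inc%64==0 else 1)' equals B's '-(-inc//64)'
theorem pv_ceil64 (a : Int) :
    PySem.Int.floordiv a 64 + (if PySem.Int.mod a 64 = 0 then (0:Int) else 1)
      = -(PySem.Int.floordiv (-a) 64) := by
  rw [PySem.Int.floordiv_eq_ediv_of_pos (by norm_num),
      PySem.Int.floordiv_eq_ediv_of_pos (by norm_num),
      PySem.Int.mod_eq_emod_of_pos (by norm_num)]
  split_ifs <;> omega

-- B's step expression (exactly the value Source B binds to 'step')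
def pvBstep (inc : Int) (outc : Int) (quantization : Bool) (use_prelu : Bool) : Int :=
  let c := -(PySem.Int.floordiv (-inc) 64)
  let blk := 16 * (PySem.Int.floordiv (outc + 7) 8)
  let step :=
    if quantization then
      let per := 512 + 72 * outc * c + blk
      let per := per + PySem.Int.mod (-per) 16
      per - 512
    else
      144 * outc * c + blk
  if use_prelu then step + blk else step

theorem pv_gws_eq (inc outc : Int) (q p : Bool) :
    pvA_get_weight_size inc outc 1 q p
      = (if q then 512 else 0) + pvBstep inc outc q p := by
  unfold pvA_get_weight_size pvBstep
  simp only [if_neg (by norm_num : ¬ (1:Int) = 5), if_neg (by norm_num : ¬ (1:Int) = 3)]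
  rw [pv_ceil64]
  have hnot : (Int.not 15 : Int) = -16 := by decide
  set c := -(PySem.Int.floordiv (-inc) 64) with hc
  set blk := 16 * (PySem.Int.floordiv (outc + 7) 8) with hblk
  cases q
  · cases p <;> simp only [ite_true, ite_false, Bool.false_eq_true] <;> ring
  · have halign : PySem.Int.band (512 + 72 * outc * c + blk + 15) (Int.not 15)
        = 512 + ((512 + 72 * outc * c + blk
            + PySem.Int.mod (-(512 + 72 * outc * c + blk)) 16) - 512) := by
      rw [hnot, pv_band_neg16, PySem.Int.mod_eq_emod_of_pos (by norm_num : (0:Int) < 16)]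
      omega
    cases p <;> simp only [ite_true, ite_false, Bool.false_eq_true] <;>
      rw [halign] <;> try ring

theorem pv_step_dvd (inc outc : Int) (q p : Bool) : (16 : Int) ∣ pvBstep inc outc q p := by
  unfold pvBstep
  set c := -(PySem.Int.floordiv (-inc) 64) with hc
  have hblk : (16:Int) ∣ 16 * (PySem.Int.floordiv (outc + 7) 8) := Dvd.intro _ rfl
  have hq : (16:Int) ∣ (512 + 72 * outc * c + 16 * (PySem.Int.floordiv (outc + 7) 8)
      + PySem.Int.mod (-(512 + 72 * outc * c + 16 * (PySem.Int.floordiv (outc + 7) 8))) 16 - 512) := by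
    rw [PySem.Int.mod_eq_emod_of_pos (by norm_num : (0:Int) < 16)]
    omega
  have hnq : (16:Int) ∣ (144 * outc * c + 16 * (PySem.Int.floordiv (outc + 7) 8)) := by
    exact dvd_add ⟨9 * outc * c, by ring⟩ hblk
  cases q <;> cases p <;> simp only [ite_true, ite_false, Bool.false_eq_true] <;>
    first
      | exact hnq
      | exact dvd_add hnq hblk
      | exact hq
      | exact dvd_add hq hblk

theorem pv_loop_closed (q : Bool) (t : Int) (ht : (16 : Int) ∣ t) :
    ∀ (n : Nat) (ws : Int), (16 : Int) ∣ ws →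
      pvA_dilLoop q ((if q then 512 else 0) + t) n ws = ws + n * t := by
  intro n
  induction n with
  | zero => intro ws _; simp [pvA_dilLoop]
  | succ k ih =>
    intro ws hws
    have hd : PySem.Int.band (ws + t) 15 = 0 := by
      rw [pv_band15]
      omega
    show pvA_dilLoop q ((if q then 512 else 0) + t) (k + 1) ws = ws + (k + 1 : Nat) * t
    unfold pvA_dilLoop
    cases q <;> simp only [ite_true, ite_false, Bool.false_eq_true] <;>
      simp only [ite_true, ite_false, Bool.false_eq_true] at ih
    · rw [show ws + ((0:Int) + t) = ws + t from by ring, hd]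
      simp only [ne_eq, not_true_eq_false, ite_false]
      rw [ih (ws + t) (dvd_add hws ht)]; push_cast; ring
    · rw [show ws + ((512:Int) + t) - 512 = ws + t from by ring, hd]
      simp only [ne_eq, not_true_eq_false, ite_false]
      rw [ih (ws + t) (dvd_add hws ht)]; push_cast; ring

-- ===== VERDICT (by name: the statement is the Claim_ definition above) =====
theorem get_weight_size_dil_py_spec : Claim_equal_get_weight_size_dil_py := by
  intro inc outc kx ky q p _
  unfold Spec_get_weight_size_dil_py
  have hbase : (16 : Int) ∣ (if q = true then 512 else 0) := by cases q <;> decide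
  have hloop := pv_loop_closed q _ (pv_step_dvd inc outc q p) ((kx * ky).toNat) _ hbase
  have hcount : (((kx * ky).toNat : Nat) : Int) = if kx * ky > 0 then kx * ky else 0 := by
    split_ifs <;> omega
  simp only [get_weight_size_dil_py, get_weight_size_dil_py_alt]
  rw [pv_gws_eq, hloop, hcount]
  simp only [pvBstep]
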